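-- pv_equiv track=rewrite | github.com/OneDragon-Anything/ZZZ_snake | path_calculator.py | find_closest_reward
-- ===== SOURCE A (Python) =====
-- def find_closest_reward(board_state, start_pos):
--     """
--     寻找最近的奖励
--     :param board_state: 棋盘状态
--     :param start_pos: 起始位置 (x, y)
--     :return: 最近奖励的位置 (x, y) 或 None
--     """
--     rewards = []
--     start_x, start_y = start_pos
--
--     # 遍历棋盘寻找奖励
--     for y in range(len(board_state)):
--         for x in range(len(board_state[y])):
--             cell = board_state[y][x]
--             if cell in ['speed_boost', 'score_boost']:
--                 # 计算曼哈顿距离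
--                 distance = abs(x - start_x) + abs(y - start_y)
--                 rewards.append(((x, y), distance))
--
--     # 按距离排序
--     rewards.sort(key=lambda x: x[1])
--
--     # 返回最近的奖励位置
--     return rewards[0][0] if rewards else None
-- ===== SOURCE B (Python) =====
-- def find_closest_reward(board_state, start_pos):
--     start_x, start_y = start_pos
--     best_pos = None
--     best_dist = None
--     for y, row in enumerate(board_state):
--         for x, cell in enumerate(row):
--             if cell == 'speed_boost' or cell == 'score_boost':
--                 d = abs(x - start_x) + abs(y - start_y)
--                 if best_dist is None or d < best_dist:
--                     best_pos, best_dist = (x, y), d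
--     return best_pos
-- ===== Notes on version B (the rewrite author's own statement) =====
-- stated objective: alternative
-- what changed: B replaces A's collect-all-rewards-into-a-list-then-stable-sort-and-take-head with a single pass over the board that keeps the first minimum-Manhattan-distance reward in row-major order, with no intermediate list and no sort.
import Mathlib
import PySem

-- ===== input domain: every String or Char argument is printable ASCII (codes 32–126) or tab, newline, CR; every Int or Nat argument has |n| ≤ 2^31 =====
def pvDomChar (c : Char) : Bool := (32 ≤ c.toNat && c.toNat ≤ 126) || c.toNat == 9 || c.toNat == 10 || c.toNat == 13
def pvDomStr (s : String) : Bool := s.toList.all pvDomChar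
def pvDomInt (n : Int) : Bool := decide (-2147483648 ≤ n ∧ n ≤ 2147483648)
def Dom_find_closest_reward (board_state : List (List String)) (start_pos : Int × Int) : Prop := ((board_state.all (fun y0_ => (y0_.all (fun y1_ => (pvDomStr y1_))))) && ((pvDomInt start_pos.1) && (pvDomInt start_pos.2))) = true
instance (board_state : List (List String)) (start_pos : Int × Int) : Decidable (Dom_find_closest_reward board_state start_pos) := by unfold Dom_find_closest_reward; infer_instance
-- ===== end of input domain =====

-- B replaces A's collect-all-rewards-then-stable-sort with a single pass that keeps the
-- first minimum-distance reward in row-major order (objective: alternative; no sort, no reward list).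


-- ===== PORT A =====
def find_closest_reward (board_state : List (List String)) (start_pos : Int × Int) : Option (Int × Int) :=
  let start_x := start_pos.1
  let start_y := start_pos.2
  -- for y in range(len(board_state)): for x in range(len(board_state[y])): … rewards.append(…)
  let rewards : List ((Int × Int) × Int) :=
    (PySem.List.pyRange 0 (PySem.List.len board_state) 1).foldl
      (fun acc y =>
        (PySem.List.pyRange 0 (PySem.List.len (PySem.List.pyGetD board_state y [])) 1).foldl
          (fun acc x =>
            if (PySem.List.pyGetD (PySem.List.pyGetD board_state y []) x "")
                ∈ (["speed_boost", "score_boost"] : List String) then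
              acc ++ [((x, y), |x - start_x| + |y - start_y|)]
            else acc)
          acc)
      []
  -- rewards.sort(key=lambda x: x[1]); return rewards[0][0] if rewards else None
  match PySem.List.sorted rewards (fun r => r.2) false with
  | [] => none
  | r :: _ => some r.1

-- ===== PORT B =====
def find_closest_reward_alt (board_state : List (List String)) (start_pos : Int × Int) : Option (Int × Int) :=
  let start_x := start_pos.1
  let start_y := start_pos.2
  -- single pass: best is (best_pos, best_dist) bundled, None at the start
  let best : Option ((Int × Int) × Int) :=
    (PySem.List.enumerate board_state 0).foldl
      (fun b yrow =>
        (PySem.List.enumerate yrow.2 0).foldl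
          (fun b xcell =>
            if xcell.2 = "speed_boost" ∨ xcell.2 = "score_boost" then
              match b with
              | none => some ((xcell.1, yrow.1), |xcell.1 - start_x| + |yrow.1 - start_y|)
              | some q =>
                  if |xcell.1 - start_x| + |yrow.1 - start_y| < q.2 then
                    some ((xcell.1, yrow.1), |xcell.1 - start_x| + |yrow.1 - start_y|)
                  else some q
            else b)
          b)
      none
  best.map (fun q => q.1)

-- ===== PRECONDITION & SPEC =====
def Spec_find_closest_reward (board_state : List (List String)) (start_pos : Int × Int) (out : Option (Int × Int)) : Prop := out = find_closest_reward_alt board_state start_pos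
instance (board_state : List (List String)) (start_pos : Int × Int) (out : Option (Int × Int)) : Decidable (Spec_find_closest_reward board_state start_pos out) := by unfold Spec_find_closest_reward; infer_instance

-- ===== CLAIM (what is proved, stated in full; the proofs are below) =====
def Claim_equal_find_closest_reward : Prop := ∀ (board_state : List (List String)) (start_pos : Int × Int), Dom_find_closest_reward board_state start_pos → Spec_find_closest_reward board_state start_pos (find_closest_reward board_state start_pos)

-- ===== LEMMAS AND PROOFS =====

-- 'for i in range(len(xs)): … xs[i] …' where the body uses the index i as well: fold over enumerate.
theorem foldl_pyRange_enum {α β : Type} (f : β → Int → α → β) (d : α) (xs : List α) :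
    ∀ (tail : List α) (s : Nat), xs.drop s = tail → ∀ (init : β),
      (PySem.List.pyRange (s : Int) (PySem.List.len xs) 1).foldl
          (fun acc j => f acc j (PySem.List.pyGetD xs j d)) init
        = (PySem.List.enumerate tail (s : Int)).foldl (fun acc p => f acc p.1 p.2) init := by
  intro tail
  induction tail with
  | nil =>
      intro s h init
      have hs : xs.length ≤ s := by
        by_contra hlt
        have := List.drop_eq_nil_iff.mp h
        omega
      rw [PySem.List.pyRange_one_eq_nil (by simp [PySem.List.len_eq]; exact_mod_cast hs)]
      simp [PySem.List.enumerate]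
  | cons a t ih =>
      intro s h init
      have hlen : s < xs.length := by
        by_contra hge
        have hnil : xs.drop s = [] := List.drop_eq_nil_iff.mpr (by omega)
        rw [hnil] at h
        simp at h
      have hget : xs[s]? = some a := by
        have h0 : (xs.drop s)[0]? = some a := by rw [h]; rfl
        rw [List.getElem?_drop] at h0
        simpa using h0
      have hdrop : xs.drop (s + 1) = t := by
        have hd : List.drop 1 (xs.drop s) = t := by rw [h]; rfl
        rw [List.drop_drop] at hd
        exact hd
      rw [PySem.List.pyRange_one_cons (by simp [PySem.List.len_eq]; exact_mod_cast hlen)]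
      rw [List.foldl_cons, PySem.List.enumerate_cons, List.foldl_cons]
      have hcast : ((s : Int) + 1) = ((s + 1 : Nat) : Int) := by push_cast; ring
      rw [hcast, ih (s + 1) hdrop]
      simp [PySem.List.pyGetD_natCast, List.getD, hget]

-- conditional accumulation fold = fold over the filtered-and-mapped list
theorem foldl_if_filter_map {α β γ : Type} (p : α → Bool) (f : α → γ) (g : β → γ → β) :
    ∀ (l : List α) (init : β),
      l.foldl (fun b x => if p x then g b (f x) else b) init
        = ((l.filter p).map f).foldl g init := by
  intro l
  induction l with
  | nil => intro init; rfl
  | cons x t ih =>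
      intro init
      by_cases hp : p x <;> simp [hp, ih]

-- head of a stable insertion: the new element wins exactly when 'before' puts it first
theorem head?_insertBy {α : Type} (before : α → α → Bool) (x : α) (acc : List α) :
    (PySem.List.insertBy before x acc).head? =
      match acc.head? with
      | none => some x
      | some a => if before x a then some x else some a := by
  cases acc with
  | nil => simp [PySem.List.insertBy]
  | cons a t =>
      simp only [PySem.List.insertBy, List.head?_cons]
      split <;> simp_all

-- head of the insertion-sort fold = strict-minimum fold (first minimum wins)
theorem head?_foldl_insertBy {α : Type} (before : α → α → Bool) :
    ∀ (l : List α) (acc : List α),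
      (l.foldl (fun acc x => PySem.List.insertBy before x acc) acc).head?
        = l.foldl
            (fun b x =>
              match b with
              | none => some x
              | some a => if before x a then some x else some a)
            acc.head? := by
  intro l
  induction l with
  | nil => intro acc; rfl
  | cons x t ih =>
      intro acc
      rw [List.foldl_cons, List.foldl_cons, ih, head?_insertBy]

-- proof-only abbreviations for the common normal form
def pvP : Int × String → Bool := fun xc => decide (xc.2 = "speed_boost" ∨ xc.2 = "score_boost")

def pvItems (sx sy : Int) : Int × List String → List ((Int × Int) × Int) :=
  fun yr => ((PySem.List.enumerate yr.2 0).filter pvP).map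
    (fun xc => ((xc.1, yr.1), |xc.1 - sx| + |yr.1 - sy|))

def pvG : Option ((Int × Int) × Int) → ((Int × Int) × Int) → Option ((Int × Int) × Int) :=
  fun b r =>
    match b with
    | none => some r
    | some q => if r.2 < q.2 then some r else some q

-- A's reward list in normal form
theorem pvA_rewards (board_state : List (List String)) (sx sy : Int) :
    (PySem.List.pyRange 0 (PySem.List.len board_state) 1).foldl
        (fun acc y =>
          (PySem.List.pyRange 0 (PySem.List.len (PySem.List.pyGetD board_state y [])) 1).foldl
            (fun acc x =>
              if (PySem.List.pyGetD (PySem.List.pyGetD board_state y []) x "")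
                  ∈ (["speed_boost", "score_boost"] : List String) then
                acc ++ [((x, y), |x - sx| + |y - sy|)]
              else acc)
            acc)
        ([] : List ((Int × Int) × Int))
      = (PySem.List.enumerate board_state 0).flatMap (pvItems sx sy) := by
  have h0 := foldl_pyRange_enum
    (f := fun (acc : List ((Int × Int) × Int)) (y : Int) (row : List String) =>
      (PySem.List.pyRange 0 (PySem.List.len row) 1).foldl
        (fun acc x =>
          if (PySem.List.pyGetD row x "") ∈ (["speed_boost", "score_boost"] : List String) then
            acc ++ [((x, y), |x - sx| + |y - sy|)]
          else acc)
        acc)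
    (d := ([] : List String)) board_state board_state 0 rfl ([] : List ((Int × Int) × Int))
  simp only [Nat.cast_zero] at h0
  rw [h0]
  have hfun : ∀ (acc : List ((Int × Int) × Int)) (yr : Int × List String),
      (PySem.List.pyRange 0 (PySem.List.len yr.2) 1).foldl
          (fun acc x =>
            if (PySem.List.pyGetD yr.2 x "") ∈ (["speed_boost", "score_boost"] : List String) then
              acc ++ [((x, yr.1), |x - sx| + |yr.1 - sy|)]
            else acc)
          acc
        = acc ++ pvItems sx sy yr := by
    intro acc yr
    have h1 := foldl_pyRange_enum
      (f := fun (acc : List ((Int × Int) × Int)) (x : Int) (cell : String) =>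
        if cell ∈ (["speed_boost", "score_boost"] : List String) then
          acc ++ [((x, yr.1), |x - sx| + |yr.1 - sy|)]
        else acc)
      (d := "") yr.2 yr.2 0 rfl acc
    simp only [Nat.cast_zero] at h1
    rw [h1]
    have h2 := PySem.List.foldl_append_if
      (p := fun (xc : Int × String) => decide (xc.2 ∈ (["speed_boost", "score_boost"] : List String)))
      (f := fun (xc : Int × String) => ((xc.1, yr.1), |xc.1 - sx| + |yr.1 - sy|))
      (PySem.List.enumerate yr.2 0) acc
    rw [show (fun (acc : List ((Int × Int) × Int)) (xc : Int × String) =>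
          if xc.2 ∈ (["speed_boost", "score_boost"] : List String) then
            acc ++ [((xc.1, yr.1), |xc.1 - sx| + |yr.1 - sy|)]
          else acc)
        = (fun acc xc =>
          if decide (xc.2 ∈ (["speed_boost", "score_boost"] : List String)) = true then
            acc ++ [((xc.1, yr.1), |xc.1 - sx| + |yr.1 - sy|)]
          else acc) from by funext acc xc; simp]
    rw [h2]
    unfold pvItems
    rw [show (fun (xc : Int × String) =>
          decide (xc.2 ∈ (["speed_boost", "score_boost"] : List String))) = pvP from by
        funext xc; simp [pvP]]
  rw [show (fun (acc : List ((Int × Int) × Int)) (yr : Int × List String) =>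
        (PySem.List.pyRange 0 (PySem.List.len yr.2) 1).foldl
          (fun acc x =>
            if (PySem.List.pyGetD yr.2 x "") ∈ (["speed_boost", "score_boost"] : List String) then
              acc ++ [((x, yr.1), |x - sx| + |yr.1 - sy|)]
            else acc)
          acc)
      = (fun acc yr => acc ++ pvItems sx sy yr) from by funext acc yr; exact hfun acc yr]
  rw [PySem.List.foldl_append_eq_flatMap]
  simp

-- head of the stable sort of any reward list = the strict-min fold over it
theorem pvSorted_head (R : List ((Int × Int) × Int)) :
    (PySem.List.sorted R (fun r => r.2) false).head? = R.foldl pvG none := by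
  rw [show PySem.List.sorted R (fun r => r.2) false
      = R.foldl (fun acc x => PySem.List.insertBy
          (fun a b => decide ((a.2 : Int) < b.2)) x acc) [] from rfl]
  rw [head?_foldl_insertBy]
  unfold pvG
  congr 1
  funext b x
  cases b <;> simp

theorem find_closest_reward_spec' (board_state : List (List String)) (start_pos : Int × Int) :
    find_closest_reward board_state start_pos = find_closest_reward_alt board_state start_pos := by
  have hA : find_closest_reward board_state start_pos
      = (((PySem.List.enumerate board_state 0).flatMap (pvItems start_pos.1 start_pos.2)).foldl
          pvG none).map (fun q => q.1) := by
    simp only [find_closest_reward]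
    rw [pvA_rewards board_state start_pos.1 start_pos.2]
    rw [← pvSorted_head]
    cases PySem.List.sorted ((PySem.List.enumerate board_state 0).flatMap
        (pvItems start_pos.1 start_pos.2)) (fun r => r.2) false <;> simp
  have hB : find_closest_reward_alt board_state start_pos
      = (((PySem.List.enumerate board_state 0).flatMap (pvItems start_pos.1 start_pos.2)).foldl
          pvG none).map (fun q => q.1) := by
    simp only [find_closest_reward_alt]
    rw [List.foldl_flatMap]
    congr 2
    funext b yrow
    have h3 := foldl_if_filter_map
      (p := pvP)
      (f := fun (xc : Int × String) => ((xc.1, yrow.1), |xc.1 - start_pos.1| + |yrow.1 - start_pos.2|))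
      (g := pvG) (PySem.List.enumerate yrow.2 0) b
    unfold pvItems
    rw [← h3]
    congr 1
    funext b xc
    by_cases hc : xc.2 = "speed_boost" ∨ xc.2 = "score_boost"
    · simp only [pvP, hc, decide_true, if_true, pvG]
    · simp [pvP, hc]
  rw [hA, hB]

-- ===== VERDICT (by name: the statement is the Claim_ definition above) =====
theorem find_closest_reward_spec : Claim_equal_find_closest_reward := by
  intro board_state start_pos _
  exact find_closest_reward_spec' board_state start_pos
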